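-- pv_equiv track=rewrite | github.com/zhenxun-org/zhenxun_bot_plugins | plugins/epic/data_source.py | _pick_dev_pub
-- ===== SOURCE A (Python) =====
-- from typing import Any
--
-- def _pick_dev_pub(game: dict[str, Any], default: str) -> tuple[str, str]:
--     game_dev, game_pub = default, default
--     for pair in game.get("customAttributes", []):
--         if pair.get("key") == "developerName":
--             game_dev = pair.get("value") or default
--         elif pair.get("key") == "publisherName":
--             game_pub = pair.get("value") or default
--     return game_dev, game_pub
-- ===== SOURCE B (Python) =====
-- from typing import Any
--
-- def _pick_dev_pub(game: dict[str, Any], default: str) -> tuple[str, str]: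
--     attrs = game.get("customAttributes", [])
--
--     def last_value(role: str) -> str:
--         # the last matching pair is decisive in A, so search back-to-front
--         # and stop at the first hit
--         for p in reversed(attrs):
--             if p.get("key") == role:
--                 return p.get("value") or default
--         return default
--
--     return last_value("developerName"), last_value("publisherName")
-- ===== Notes on version B (the rewrite author's own statement) =====
-- stated objective: alternative
-- what changed: Replaces A's single forward fold that overwrites two accumulators with two early-exit backward searches: scan reversed(attrs) and return at the first pair whose key matches, since A's overwrite makes the last match decisive.
import Mathlib
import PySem

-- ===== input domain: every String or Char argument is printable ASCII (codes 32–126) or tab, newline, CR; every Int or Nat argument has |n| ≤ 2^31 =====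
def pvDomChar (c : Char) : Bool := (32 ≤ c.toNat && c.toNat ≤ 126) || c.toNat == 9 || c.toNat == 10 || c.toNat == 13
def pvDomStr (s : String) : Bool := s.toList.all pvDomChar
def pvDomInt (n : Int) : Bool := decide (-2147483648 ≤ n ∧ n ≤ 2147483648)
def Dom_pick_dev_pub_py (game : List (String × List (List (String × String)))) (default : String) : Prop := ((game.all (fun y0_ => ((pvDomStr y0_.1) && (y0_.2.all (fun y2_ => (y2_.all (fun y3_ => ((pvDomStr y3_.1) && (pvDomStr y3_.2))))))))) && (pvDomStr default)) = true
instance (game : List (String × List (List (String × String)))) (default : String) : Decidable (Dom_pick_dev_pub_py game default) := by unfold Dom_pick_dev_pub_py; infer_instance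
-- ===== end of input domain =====

-- B replaces A's forward overwrite fold by two early-exit backward searches (the last match is decisive).

-- Python's `x or default` for x : Optional[str] (None and "" are falsy)
def pvOrDefault (v : Option String) (default : String) : String :=
  match v with
  | none => default
  | some s => if s = "" then default else s

-- ===== PORT A =====
def pick_dev_pub_py (game : List (String × List (List (String × String)))) (default : String) : String × String :=
  ((PySem.Dict.mk game).getD "customAttributes" []).foldl
    (fun s pair =>
      if (PySem.Dict.mk pair).get? "key" = some "developerName" then
        (pvOrDefault ((PySem.Dict.mk pair).get? "value") default, s.2)
      else if (PySem.Dict.mk pair).get? "key" = some "publisherName" then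
        (s.1, pvOrDefault ((PySem.Dict.mk pair).get? "value") default)
      else s)
    (default, default)

-- ===== PORT B =====
-- `last_value`: walk the reversed attribute list, return at the first pair whose key matches
def pvLastValue (role default : String) : List (List (String × String)) → String
  | [] => default
  | p :: rest =>
    if (PySem.Dict.mk p).get? "key" = some role then
      pvOrDefault ((PySem.Dict.mk p).get? "value") default
    else pvLastValue role default rest

def pick_dev_pub_py_alt (game : List (String × List (List (String × String)))) (default : String) : String × String :=
  let attrs := (PySem.Dict.mk game).getD "customAttributes" []
  (pvLastValue "developerName" default attrs.reverse,
   pvLastValue "publisherName" default attrs.reverse)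

-- ===== PRECONDITION & SPEC =====
def Spec_pick_dev_pub_py (game : List (String × List (List (String × String)))) (default : String) (out : String × String) : Prop := out = pick_dev_pub_py_alt game default
instance (game : List (String × List (List (String × String)))) (default : String) (out : String × String) : Decidable (Spec_pick_dev_pub_py game default out) := by unfold Spec_pick_dev_pub_py; infer_instance

-- ===== CLAIM (what is proved, stated in full; the proofs are below) =====
def Claim_equal_pick_dev_pub_py : Prop := ∀ (game : List (String × List (List (String × String)))) (default : String), Dom_pick_dev_pub_py game default → Spec_pick_dev_pub_py game default (pick_dev_pub_py game default)

-- ===== LEMMAS AND PROOFS =====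

-- Backward first-match with an explicit fallback: like pvLastValue but falls back to `s0`
-- instead of `default` when no pair matches; used to state the fold invariant.
def pvLastValueFrom (role default s0 : String) : List (List (String × String)) → String
  | [] => s0
  | p :: rest =>
    if (PySem.Dict.mk p).get? "key" = some role then
      pvOrDefault ((PySem.Dict.mk p).get? "value") default
    else pvLastValueFrom role default s0 rest

theorem pvLastValueFrom_default (role default : String) (l : List (List (String × String))) :
    pvLastValueFrom role default default l = pvLastValue role default l := by
  induction l with
  | nil => rfl
  | cons p rest ih => simp [pvLastValueFrom, pvLastValue, ih]

-- A's forward fold from any start state computes exactly the backward first-match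
-- with the start state's components as fallback.
theorem pv_fold_eq (default : String) (l : List (List (String × String))) :
    ∀ (dev pub : String),
    l.foldl
      (fun s pair =>
        if (PySem.Dict.mk pair).get? "key" = some "developerName" then
          (pvOrDefault ((PySem.Dict.mk pair).get? "value") default, s.2)
        else if (PySem.Dict.mk pair).get? "key" = some "publisherName" then
          (s.1, pvOrDefault ((PySem.Dict.mk pair).get? "value") default)
        else s) (dev, pub)
    = (pvLastValueFrom "developerName" default dev l.reverse,
       pvLastValueFrom "publisherName" default pub l.reverse) := by
  induction l using List.reverseRecOn with
  | nil => intro dev pub; rfl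
  | append_singleton l p ih =>
    intro dev pub
    simp only [List.foldl_append, List.foldl_cons, List.foldl_nil, ih,
      List.reverse_append, List.reverse_cons, List.reverse_nil, List.nil_append,
      List.cons_append, pvLastValueFrom]
    by_cases h1 : (PySem.Dict.mk p).get? "key" = some "developerName"
    · simp [h1, pvLastValueFrom, ih]
    · by_cases h2 : (PySem.Dict.mk p).get? "key" = some "publisherName"
      · simp [h1, h2, pvLastValueFrom, ih]
      · simp [h1, h2, pvLastValueFrom, ih]

-- ===== VERDICT (by name: the statement is the Claim_ definition above) =====
theorem pick_dev_pub_py_spec : Claim_equal_pick_dev_pub_py := by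
  intro game default _
  unfold Spec_pick_dev_pub_py pick_dev_pub_py pick_dev_pub_py_alt
  rw [pv_fold_eq, pvLastValueFrom_default, pvLastValueFrom_default]
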